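-- pv_equiv track=rewrite | github.com/yangkunx/auto-opt | utils/parse_pandas.py | create_sum
-- ===== SOURCE A (Python) =====
-- def create_sum(data):
--     """create dict of the same batch_size
--
--     Args:
--         data (list): [{'core': '50', 'precision': 'bfloat16', 'batch_size': '1', 'kpi': {'2.8Ghz':
--                       ['=HYPERLINK("https://wsf-dashboards.intel.com/services-framework/perfkitruns/run_uri/04a3fa32-1023-47f2-acf4-1de06d4ec916", "8.652")', 0.892, 0.061]}]
--
--     Returns:
--         _type_: dict
--         value: grouped_dict
--     """
--     grouped_dict = {}
--     for x in data:
--         if x['batch_size'] not in grouped_dict: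
--             grouped_dict[x['batch_size']] = [x]
--         else:
--             grouped_dict[x['batch_size']].append(x)
--     return grouped_dict
-- ===== SOURCE B (Python) =====
-- def create_sum(data):
--     """create dict of the same batch_size (dedup keys, then gather each group by filtering)"""
--     keys = dict.fromkeys(x['batch_size'] for x in data)
--     return {k: [x for x in data if x['batch_size'] == k] for k in keys}
-- ===== Notes on version B (the rewrite author's own statement) =====
-- stated objective: idiomatic
-- what changed: B replaces A's single-pass bucketing (membership test then create-or-append into the dict) by two comprehensions: dict.fromkeys collects the distinct batch_size keys in first-occurrence order, then a dict comprehension builds each group by filtering the whole list per key.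
import Mathlib
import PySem

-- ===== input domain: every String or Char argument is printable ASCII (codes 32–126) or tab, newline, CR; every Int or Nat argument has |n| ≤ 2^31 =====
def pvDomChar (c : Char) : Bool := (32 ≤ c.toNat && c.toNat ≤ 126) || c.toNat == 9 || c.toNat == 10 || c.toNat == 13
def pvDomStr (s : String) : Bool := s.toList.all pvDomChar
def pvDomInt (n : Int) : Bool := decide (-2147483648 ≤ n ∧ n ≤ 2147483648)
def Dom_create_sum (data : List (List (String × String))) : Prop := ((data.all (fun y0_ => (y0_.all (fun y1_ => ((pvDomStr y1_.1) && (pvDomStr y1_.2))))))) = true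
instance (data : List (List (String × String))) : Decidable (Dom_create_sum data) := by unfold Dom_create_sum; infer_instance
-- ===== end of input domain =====

-- B groups by collecting the distinct batch_size keys first (dict.fromkeys) and then filtering the
-- list once per key, instead of A's single-pass create-or-append bucketing; objective: idiomatic.


-- x['batch_size'] (first match in the association list; Pre_ guarantees the key is present,
-- so the "" default is never used on admitted inputs)
def pvBatchKey (x : List (String × String)) : String :=
  (PySem.Dict.mk x).getD "batch_size" ""

-- ===== PORT A =====
def create_sum (data : List (List (String × String))) : List (String × List (List (String × String))) :=
  (data.foldl (fun d x =>
      let k := pvBatchKey x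
      if d.contains k = false then d.insert k [x]
      else d.modify k [] (fun l => l ++ [x]))
    PySem.Dict.empty).items

-- ===== PORT B =====
def create_sum_alt (data : List (List (String × String))) : List (String × List (List (String × String))) :=
  let keys := PySem.List.dedup (data.map pvBatchKey)
  (keys.foldl (fun d k =>
      d.insert k (data.filter (fun x => pvBatchKey x == k)))
    PySem.Dict.empty).items

-- ===== PRECONDITION & SPEC =====
-- Pre_ excludes exactly the inputs where some element lacks the 'batch_size' key, on which A raises KeyError.
def Pre_create_sum (data : List (List (String × String))) : Prop :=
  ∀ x ∈ data, (PySem.Dict.mk x).contains "batch_size" = true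
instance (data : List (List (String × String))) : Decidable (Pre_create_sum data) := by unfold Pre_create_sum; infer_instance

def pvWitness_create_sum : (List (List (String × String))) :=
  [[("batch_size", "1"), ("core", "50")], [("batch_size", "2")], [("batch_size", "1")]]

def Spec_create_sum (data : List (List (String × String))) (out : List (String × List (List (String × String)))) : Prop := out = create_sum_alt data
instance (data : List (List (String × String))) (out : List (String × List (List (String × String)))) : Decidable (Spec_create_sum data out) := by unfold Spec_create_sum; infer_instance

-- ===== CLAIM (what is proved, stated in full; the proofs are below) =====
def Claim_equal_create_sum : Prop := ∀ (data : List (List (String × String))), Dom_create_sum data → Pre_create_sum data → Spec_create_sum data (create_sum data)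

-- ===== LEMMAS AND PROOFS =====

-- A's create-or-append branch is exactly a modify with default []
lemma create_sum_step_eq (d : PySem.Dict String (List (List (String × String)))) (x : List (String × String)) :
    (if d.contains (pvBatchKey x) = false then d.insert (pvBatchKey x) [x]
     else d.modify (pvBatchKey x) [] (fun l => l ++ [x]))
    = d.modify (pvBatchKey x) [] (fun l => l ++ [x]) := by
  by_cases h : d.contains (pvBatchKey x) = false
  · simp [h, PySem.Dict.modify, PySem.Dict.getD_of_not_contains d [] h]
  · simp [h]

lemma create_sum_eq (data : List (List (String × String))) :
    create_sum data = create_sum_alt data := by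
  have hstep : (fun (d : PySem.Dict String (List (List (String × String)))) x =>
      let k := pvBatchKey x
      if d.contains k = false then d.insert k [x] else d.modify k [] (fun l => l ++ [x]))
      = fun d x => d.modify (pvBatchKey x) [] (fun l => l ++ [x]) := by
    funext d x; exact create_sum_step_eq d x
  have hnodup : (data.foldl (fun d x => d.modify (pvBatchKey x) [] (fun l => l ++ [x]))
      PySem.Dict.empty).keys.Nodup :=
    PySem.Dict.nodup_keys_foldl_modify_key data pvBatchKey [] (fun _ x l => l ++ [x]) _ (by simp)
  have hkeys : (data.foldl (fun d x => d.modify (pvBatchKey x) [] (fun l => l ++ [x]))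
      PySem.Dict.empty).keys = PySem.List.dedup (data.map pvBatchKey) := by
    rw [PySem.Dict.keys_foldl_modify_key data pvBatchKey [] (fun _ x l => l ++ [x])]
    rfl
  have hgetD : ∀ k, (data.foldl (fun d x => d.modify (pvBatchKey x) [] (fun l => l ++ [x]))
      PySem.Dict.empty).getD k [] = data.filter (fun x => pvBatchKey x == k) := by
    intro k
    have hmap : (data.map (fun x => (pvBatchKey x, x))).foldl
        (fun d p => d.modify p.1 [] (fun l => l ++ [p.2])) PySem.Dict.empty
        = data.foldl (fun d x => d.modify (pvBatchKey x) [] (fun l => l ++ [x]))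
            PySem.Dict.empty := by
      rw [List.foldl_map]
    rw [← hmap, PySem.Dict.getD_foldl_modify_append]
    simp [List.filter_map, Function.comp_def]
  have hfresh := PySem.Dict.items_foldl_insert_fresh
      (PySem.List.dedup (data.map pvBatchKey)) (fun k => k)
      (fun k => data.filter (fun x => pvBatchKey x == k))
      (PySem.Dict.empty)
      (by intro a _; simp [PySem.Dict.contains_empty])
      (by simp)
  simp only [show (PySem.Dict.empty : PySem.Dict String (List (List (String × String)))).items = [] from rfl, List.nil_append] at hfresh
  show (data.foldl (fun d x =>
      let k := pvBatchKey x
      if d.contains k = false then d.insert k [x] else d.modify k [] (fun l => l ++ [x]))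
    PySem.Dict.empty).items
    = ((PySem.List.dedup (data.map pvBatchKey)).foldl (fun d k =>
        d.insert k (data.filter (fun x => pvBatchKey x == k))) PySem.Dict.empty).items
  rw [hstep, hfresh, PySem.Dict.items_eq_map_keys _ hnodup [], hkeys]
  simp [hgetD]

-- ===== VERDICT (by name: the statement is the Claim_ definition above) =====
theorem create_sum_spec : Claim_equal_create_sum := by
  intro data _ _
  unfold Spec_create_sum
  exact create_sum_eq data
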